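-- pv_equiv track=rewrite | github.com/KubeRocketCI/krci-ai-spa | scripts/process-data.py | infer_categories_from_name
-- ===== SOURCE A (Python) =====
-- from typing import Dict, Any, List
--
-- def infer_categories_from_name(data_id: str) -> List[str]:
--     """Infer likely categories based on data file name patterns."""
--     name_lower = data_id.lower()
--
--     # Category inference rules based on common data file patterns
--     if any(keyword in name_lower for keyword in ['test', 'qa', 'quality', 'metrics']):
--         return ["Testing"]
--     elif any(keyword in name_lower for keyword in ['architecture', 'design', 'patterns', 'principles']):
--         return ["Architecture"]
--     elif any(keyword in name_lower for keyword in ['business', 'analysis', 'requirements', 'frameworks']):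
--         return ["Analysis"]
--     elif any(keyword in name_lower for keyword in ['development', 'coding', 'standards', 'practices']):
--         return ["Development"]
--     elif any(keyword in name_lower for keyword in ['management', 'project', 'process']):
--         return ["Management"]
--     elif any(keyword in name_lower for keyword in ['product', 'strategy', 'validation']):
--         return ["Product"]
--     elif any(keyword in name_lower for keyword in ['framework', 'core']):
--         return ["Framework Core"]
--     else:
--         return ["Development"]  # Default fallback category for data files
-- ===== SOURCE B (Python) =====
-- # B scans the lowered name position by position (naive multi-pattern text scan),
-- # collects the priority of every keyword that starts at some position, and maps
-- # the minimum matched priority to its category (default "Development").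
-- KEYWORD_PRIORITY = {
--     'test': 0, 'qa': 0, 'quality': 0, 'metrics': 0,
--     'architecture': 1, 'design': 1, 'patterns': 1, 'principles': 1,
--     'business': 2, 'analysis': 2, 'requirements': 2, 'frameworks': 2,
--     'development': 3, 'coding': 3, 'standards': 3, 'practices': 3,
--     'management': 4, 'project': 4, 'process': 4,
--     'product': 5, 'strategy': 5, 'validation': 5,
--     'framework': 6, 'core': 6,
-- }
-- CATEGORIES = ["Testing", "Architecture", "Analysis", "Development",
--               "Management", "Product", "Framework Core"]
--
-- def infer_categories_from_name(data_id: str):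
--     """Infer likely categories based on data file name patterns."""
--     s = data_id.lower()
--     hits = [pri for i in range(len(s))
--             for kw, pri in KEYWORD_PRIORITY.items() if s.startswith(kw, i)]
--     return [CATEGORIES[min(hits)]] if hits else ["Development"]
-- ===== Notes on version B (the rewrite author's own statement) =====
-- stated objective: alternative
-- what changed: Instead of A's per-keyword substring tests in a 7-branch if/elif chain, B scans the lowered name position by position like a naive multi-pattern matcher, collects the priority of every keyword starting at each position, and maps the minimum matched priority to its category (same priorities and default, so the first-matching-group result is identical).
import Mathlib
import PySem

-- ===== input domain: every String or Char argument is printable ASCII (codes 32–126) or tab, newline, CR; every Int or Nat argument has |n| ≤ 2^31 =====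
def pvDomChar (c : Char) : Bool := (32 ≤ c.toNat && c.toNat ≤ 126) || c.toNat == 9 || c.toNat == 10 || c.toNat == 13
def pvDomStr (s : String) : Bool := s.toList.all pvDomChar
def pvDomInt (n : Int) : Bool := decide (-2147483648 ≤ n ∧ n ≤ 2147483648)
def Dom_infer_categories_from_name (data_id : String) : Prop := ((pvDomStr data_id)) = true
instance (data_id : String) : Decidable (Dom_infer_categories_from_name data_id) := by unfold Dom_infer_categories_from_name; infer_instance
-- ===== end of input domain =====

-- B replaces A's 7-branch keyword-substring chain by a positional text scan that collects every matched keyword's priority and returns the category of the minimum (alternative algorithm, same cost).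

-- ===== PORT A =====
def infer_categories_from_name (data_id : String) : List String :=
  let name_lower := PySem.Str.lower data_id
  if ["test", "qa", "quality", "metrics"].any (fun keyword => PySem.Str.isIn keyword name_lower) then
    ["Testing"]
  else if ["architecture", "design", "patterns", "principles"].any (fun keyword => PySem.Str.isIn keyword name_lower) then
    ["Architecture"]
  else if ["business", "analysis", "requirements", "frameworks"].any (fun keyword => PySem.Str.isIn keyword name_lower) then
    ["Analysis"]
  else if ["development", "coding", "standards", "practices"].any (fun keyword => PySem.Str.isIn keyword name_lower) then
    ["Development"]
  else if ["management", "project", "process"].any (fun keyword => PySem.Str.isIn keyword name_lower) then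
    ["Management"]
  else if ["product", "strategy", "validation"].any (fun keyword => PySem.Str.isIn keyword name_lower) then
    ["Product"]
  else if ["framework", "core"].any (fun keyword => PySem.Str.isIn keyword name_lower) then
    ["Framework Core"]
  else
    ["Development"]


-- ===== PORT B =====
-- KEYWORD_PRIORITY dict as an association list, CATEGORIES table
def pvKwPri : List (String × Int) :=
  [("test", 0), ("qa", 0), ("quality", 0), ("metrics", 0),
   ("architecture", 1), ("design", 1), ("patterns", 1), ("principles", 1),
   ("business", 2), ("analysis", 2), ("requirements", 2), ("frameworks", 2),
   ("development", 3), ("coding", 3), ("standards", 3), ("practices", 3),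
   ("management", 4), ("project", 4), ("process", 4),
   ("product", 5), ("strategy", 5), ("validation", 5),
   ("framework", 6), ("core", 6)]

def pvCats : List String :=
  ["Testing", "Architecture", "Analysis", "Development", "Management", "Product", "Framework Core"]

def infer_categories_from_name_alt (data_id : String) : List String :=
  let s := PySem.Str.lower data_id
  -- Source B's `s.startswith(kw, i)` has no PySem primitive; ported by hand as startswith of the
  -- slice s[i:] — exact for the indices 0 ≤ i < len(s) that range() produces here
  let hits := (PySem.List.pyRange 0 (PySem.Str.len s) 1).flatMap
    (fun i => (pvKwPri.filter
        (fun kp => PySem.Str.startswith (PySem.Str.slice s (some i) none) kp.1)).map (·.2))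
  match PySem.List.min? hits (fun x => x) with
  | some m => [PySem.List.pyGetD pvCats m ""]
  | none => ["Development"]


-- ===== PRECONDITION & SPEC =====
def Spec_infer_categories_from_name (data_id : String) (out : List String) : Prop := out = infer_categories_from_name_alt data_id
instance (data_id : String) (out : List String) : Decidable (Spec_infer_categories_from_name data_id out) := by unfold Spec_infer_categories_from_name; infer_instance

-- ===== CLAIM (what is proved, stated in full; the proofs are below) =====
def Claim_equal_infer_categories_from_name : Prop := ∀ (data_id : String), Dom_infer_categories_from_name data_id → Spec_infer_categories_from_name data_id (infer_categories_from_name data_id)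

-- ===== LEMMAS AND PROOFS =====

-- a nonempty pattern is a prefix of some in-range tail of cs iff it is a substring of cs

theorem pv_exists_range_prefix (cs sub : List Char) (h : sub ≠ []) :
    (∃ i ∈ PySem.List.pyRange 0 (cs.length : Int) 1,
        PySem.Chars.startswith (PySem.List.slice cs (some i) none) sub = true)
      ↔ PySem.Chars.isIn sub cs = true := by
  rw [← PySem.Chars.exists_prefix_drop_iff_isIn]
  constructor
  · rintro ⟨i, hi, hsw⟩
    rw [PySem.List.mem_pyRange_one] at hi
    rw [PySem.List.slice_from cs hi.1, PySem.Chars.startswith_iff] at hsw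
    exact ⟨i.toNat, hsw⟩
  · rintro ⟨j, hj⟩
    by_cases hlt : j < cs.length
    · refine ⟨(j : Int), ?_, ?_⟩
      · rw [PySem.List.mem_pyRange_one]; omega
      · rw [PySem.List.slice_from cs (by positivity), PySem.Chars.startswith_iff]
        simpa using hj
    · exfalso
      rw [List.drop_eq_nil_of_le (by omega)] at hj
      exact h (List.prefix_nil.mp hj)

-- pvMatches p: some keyword of priority p occurs in cs (proof-side characterisation)
def pvMatches (cs : List Char) (p : Int) : Prop :=
  ∃ kp ∈ pvKwPri, kp.2 = p ∧ PySem.Chars.isIn kp.1.toList cs = true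

theorem pv_kw_ne : ∀ kp ∈ pvKwPri, kp.1.toList ≠ [] := by decide

theorem pv_mem_hits (s : String) (p : Int) :
    (p ∈ (PySem.List.pyRange 0 (PySem.Str.len s) 1).flatMap
      (fun i => (pvKwPri.filter
        (fun kp => PySem.Str.startswith (PySem.Str.slice s (some i) none) kp.1)).map (·.2)))
      ↔ pvMatches s.toList p := by
  simp only [List.mem_flatMap, List.mem_map, List.mem_filter, pvMatches,
    PySem.Str.startswith_eq, PySem.Str.toList_slice, PySem.Str.len_eq]
  constructor
  · rintro ⟨i, hi, kp, ⟨hkp, hsw⟩, hp⟩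
    exact ⟨kp, hkp, hp, (pv_exists_range_prefix _ _ (pv_kw_ne kp hkp)).mp ⟨i, hi, hsw⟩⟩
  · rintro ⟨kp, hkp, hp, hin⟩
    obtain ⟨i, hi, hsw⟩ := (pv_exists_range_prefix _ _ (pv_kw_ne kp hkp)).mpr hin
    exact ⟨i, hi, kp, ⟨hkp, hsw⟩, hp⟩

theorem pv_matches_bounds (cs : List Char) (p : Int) (h : pvMatches cs p) : 0 ≤ p ∧ p < 7 := by
  obtain ⟨kp, hkp, hp, -⟩ := h
  have h7 : ∀ kp ∈ pvKwPri, 0 ≤ kp.2 ∧ kp.2 < 7 := by decide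
  have := h7 kp hkp
  omega

theorem pv_min?_eq (hits : List Int) (P : Int → Prop) (hmem : ∀ p, p ∈ hits ↔ P p)
    (g : Int) (hg : P g) (hlt : ∀ p, P p → g ≤ p) :
    PySem.List.min? hits (fun x => x) = some g := by
  cases h : PySem.List.min? hits (fun x => x) with
  | none =>
    rw [PySem.List.min?_eq_none_iff] at h
    exact absurd ((hmem g).mpr hg) (by simp [h])
  | some m =>
    have hm : m ∈ hits := PySem.List.min?_mem h
    have h1 : m ≤ g := PySem.List.min?_isMin h g ((hmem g).mpr hg)
    have h2 : g ≤ m := hlt m ((hmem m).mp hm)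
    rw [le_antisymm h1 h2]

theorem pv_min?_none (hits : List Int) (P : Int → Prop) (hmem : ∀ p, p ∈ hits ↔ P p)
    (h : ∀ p, ¬ P p) : PySem.List.min? hits (fun x => x) = none := by
  rw [PySem.List.min?_eq_none_iff]
  exact List.eq_nil_iff_forall_not_mem.mpr (fun p hp => h p ((hmem p).mp hp))

theorem pv_grp0 (s : String) :
    (["test", "qa", "quality", "metrics"].any (fun keyword => PySem.Str.isIn keyword s)) = true
      ↔ pvMatches s.toList 0 := by
  simp [pvMatches, pvKwPri, PySem.Str.isIn_eq]

theorem pv_grp1 (s : String) :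
    (["architecture", "design", "patterns", "principles"].any (fun keyword => PySem.Str.isIn keyword s)) = true
      ↔ pvMatches s.toList 1 := by
  simp [pvMatches, pvKwPri, PySem.Str.isIn_eq]

theorem pv_grp2 (s : String) :
    (["business", "analysis", "requirements", "frameworks"].any (fun keyword => PySem.Str.isIn keyword s)) = true
      ↔ pvMatches s.toList 2 := by
  simp [pvMatches, pvKwPri, PySem.Str.isIn_eq]

theorem pv_grp3 (s : String) :
    (["development", "coding", "standards", "practices"].any (fun keyword => PySem.Str.isIn keyword s)) = true
      ↔ pvMatches s.toList 3 := by
  simp [pvMatches, pvKwPri, PySem.Str.isIn_eq]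

theorem pv_grp4 (s : String) :
    (["management", "project", "process"].any (fun keyword => PySem.Str.isIn keyword s)) = true
      ↔ pvMatches s.toList 4 := by
  simp [pvMatches, pvKwPri, PySem.Str.isIn_eq]

theorem pv_grp5 (s : String) :
    (["product", "strategy", "validation"].any (fun keyword => PySem.Str.isIn keyword s)) = true
      ↔ pvMatches s.toList 5 := by
  simp [pvMatches, pvKwPri, PySem.Str.isIn_eq]

theorem pv_grp6 (s : String) :
    (["framework", "core"].any (fun keyword => PySem.Str.isIn keyword s)) = true
      ↔ pvMatches s.toList 6 := by
  simp [pvMatches, pvKwPri, PySem.Str.isIn_eq]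


-- ===== VERDICT (by name: the statement is the Claim_ definition above) =====
theorem infer_categories_from_name_spec : Claim_equal_infer_categories_from_name := by
  intro data_id _
  unfold Spec_infer_categories_from_name
  simp only [infer_categories_from_name, infer_categories_from_name_alt]
  set s := PySem.Str.lower data_id with hs
  have hmem := pv_mem_hits s
  have hup := pv_matches_bounds s.toList
  by_cases h0 : pvMatches s.toList 0
  · rw [if_pos ((pv_grp0 s).mpr h0),
      pv_min?_eq _ _ hmem 0 h0 (fun p hp => (hup p hp).1)]
    rfl
  · rw [if_neg (fun hc => h0 ((pv_grp0 s).mp hc))]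
    by_cases h1 : pvMatches s.toList 1
    · rw [if_pos ((pv_grp1 s).mpr h1),
        pv_min?_eq _ _ hmem 1 h1 (fun p hp => by
          obtain ⟨hL, hR⟩ := hup p hp; interval_cases p <;> first | omega | exact absurd hp h0)]
      rfl
    · rw [if_neg (fun hc => h1 ((pv_grp1 s).mp hc))]
      by_cases h2 : pvMatches s.toList 2
      · rw [if_pos ((pv_grp2 s).mpr h2),
          pv_min?_eq _ _ hmem 2 h2 (fun p hp => by
            obtain ⟨hL, hR⟩ := hup p hp; interval_cases p <;>
              first | omega | exact absurd hp h0 | exact absurd hp h1)]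
        rfl
      · rw [if_neg (fun hc => h2 ((pv_grp2 s).mp hc))]
        by_cases h3 : pvMatches s.toList 3
        · rw [if_pos ((pv_grp3 s).mpr h3),
            pv_min?_eq _ _ hmem 3 h3 (fun p hp => by
              obtain ⟨hL, hR⟩ := hup p hp; interval_cases p <;>
                first | omega | exact absurd hp h0 | exact absurd hp h1 | exact absurd hp h2)]
          rfl
        · rw [if_neg (fun hc => h3 ((pv_grp3 s).mp hc))]
          by_cases h4 : pvMatches s.toList 4
          · rw [if_pos ((pv_grp4 s).mpr h4),
              pv_min?_eq _ _ hmem 4 h4 (fun p hp => by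
                obtain ⟨hL, hR⟩ := hup p hp; interval_cases p <;>
                  first | omega | exact absurd hp h0 | exact absurd hp h1 | exact absurd hp h2 |
                    exact absurd hp h3)]
            rfl
          · rw [if_neg (fun hc => h4 ((pv_grp4 s).mp hc))]
            by_cases h5 : pvMatches s.toList 5
            · rw [if_pos ((pv_grp5 s).mpr h5),
                pv_min?_eq _ _ hmem 5 h5 (fun p hp => by
                  obtain ⟨hL, hR⟩ := hup p hp; interval_cases p <;>
                    first | omega | exact absurd hp h0 | exact absurd hp h1 | exact absurd hp h2 |
                      exact absurd hp h3 | exact absurd hp h4)]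
              rfl
            · rw [if_neg (fun hc => h5 ((pv_grp5 s).mp hc))]
              by_cases h6 : pvMatches s.toList 6
              · rw [if_pos ((pv_grp6 s).mpr h6),
                  pv_min?_eq _ _ hmem 6 h6 (fun p hp => by
                    obtain ⟨hL, hR⟩ := hup p hp; interval_cases p <;>
                      first | omega | exact absurd hp h0 | exact absurd hp h1 | exact absurd hp h2 |
                        exact absurd hp h3 | exact absurd hp h4 | exact absurd hp h5)]
                rfl
              · rw [if_neg (fun hc => h6 ((pv_grp6 s).mp hc))]
                rw [pv_min?_none _ _ hmem (fun p hp => by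
                  obtain ⟨hL, hR⟩ := hup p hp; interval_cases p <;>
                    first | exact absurd hp h0 | exact absurd hp h1 | exact absurd hp h2 |
                      exact absurd hp h3 | exact absurd hp h4 | exact absurd hp h5 | exact absurd hp h6)]
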